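-- pv_equiv track=rewrite | github.com/Narukodo/Advent-of-Code-2023 | day10.py | count_column
-- ===== SOURCE A (Python) =====
-- def count_column(pipe_tiles):
--     min_y = pipe_tiles[0]
--     max_y = pipe_tiles[-1]
--     space_count = 0
--     tiles_in_loop = 0
--     for i in range (min_y, max_y + 1):
--         if i not in pipe_tiles and i - 1 in pipe_tiles:
--             space_count += 1
--         if space_count % 2 == 1 and i not in pipe_tiles:
--             tiles_in_loop += 1
--     return tiles_in_loop
-- ===== SOURCE B (Python) =====
-- def count_column(pipe_tiles):
--     lo = pipe_tiles[0]
--     hi = pipe_tiles[-1]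
--     if lo > hi:
--         return 0
--     ts = sorted({t for t in pipe_tiles if lo - 1 <= t <= hi})
--     total = 0
--     inside = False
--     for prev, cur in zip(ts, ts[1:]):
--         gap = cur - prev - 1
--         if gap > 0:
--             inside = not inside
--             if inside:
--                 total += gap
--     return total
-- ===== Notes on version B (the rewrite author's own statement) =====
-- stated objective: faster
-- what changed: B replaces A's scan of every integer in [first, last] with a linear list-membership test per point by one pass over the sorted distinct tiles, adding each gap length at every odd parity crossing.
import Mathlib
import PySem

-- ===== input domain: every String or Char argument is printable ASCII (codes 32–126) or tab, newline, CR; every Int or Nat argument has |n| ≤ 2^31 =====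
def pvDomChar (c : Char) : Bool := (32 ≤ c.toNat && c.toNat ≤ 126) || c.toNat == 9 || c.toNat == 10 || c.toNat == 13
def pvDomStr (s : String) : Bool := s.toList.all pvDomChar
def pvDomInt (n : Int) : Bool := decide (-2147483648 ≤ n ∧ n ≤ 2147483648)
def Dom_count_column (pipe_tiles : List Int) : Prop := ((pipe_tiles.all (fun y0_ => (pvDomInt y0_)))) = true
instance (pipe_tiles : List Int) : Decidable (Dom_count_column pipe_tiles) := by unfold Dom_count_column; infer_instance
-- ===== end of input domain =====

-- B replaces A's scan of the whole integer range (with a linear list-membership test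
-- per point) by one pass over the sorted distinct tiles, adding gap lengths at every
-- odd crossing; objective: faster.

-- ===== PORT A =====
-- one loop iteration of A: the two ifs, in order
def stepA (l : List Int) (st : Int × Int) (i : Int) : Int × Int :=
  let st1 := if i ∉ l ∧ (i - 1) ∈ l then (st.1 + 1, st.2) else st
  if PySem.Int.mod st1.1 2 = 1 ∧ i ∉ l then (st1.1, st1.2 + 1) else st1

def count_column (pipe_tiles : List Int) : Int :=
  match PySem.List.pyGet? pipe_tiles 0, PySem.List.pyGet? pipe_tiles (-1) with
  | some min_y, some max_y =>
      ((PySem.List.pyRange min_y (max_y + 1) 1).foldl (stepA pipe_tiles) (0, 0)).2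
  | _, _ => 0   -- unreachable under Pre_ (IndexError on the empty list)

-- ===== PORT B =====
-- one iteration of B's loop over consecutive sorted tiles (prev, cur)
def stepB (st : Int × Bool) (pr : Int × Int) : Int × Bool :=
  let gap := pr.2 - pr.1 - 1
  if 0 < gap then
    let ins := !st.2
    (if ins then st.1 + gap else st.1, ins)
  else st

def count_column_alt (pipe_tiles : List Int) : Int :=
  match PySem.List.pyGet? pipe_tiles 0 with
  | none => 0   -- unreachable under Pre_
  | some lo =>
    match PySem.List.pyGet? pipe_tiles (-1) with
    | none => 0   -- unreachable under Pre_
    | some hi =>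
      if hi < lo then 0
      else
        let ts := PySem.List.sorted
          (PySem.Set.ofList (pipe_tiles.filter (fun t => decide (lo - 1 ≤ t ∧ t ≤ hi))))
          (fun x => x) false
        ((ts.zip ts.tail).foldl stepB (0, false)).1

-- ===== PRECONDITION & SPEC =====
-- A raises IndexError on the empty list (pipe_tiles[0]); Pre_ excludes exactly that.
def Pre_count_column (pipe_tiles : List Int) : Prop := pipe_tiles ≠ []
instance (pipe_tiles : List Int) : Decidable (Pre_count_column pipe_tiles) := by
  unfold Pre_count_column; infer_instance
def pvWitness_count_column : List Int := ([0, 4] : List Int)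

def Spec_count_column (pipe_tiles : List Int) (out : Int) : Prop := out = count_column_alt pipe_tiles
instance (pipe_tiles : List Int) (out : Int) : Decidable (Spec_count_column pipe_tiles out) := by unfold Spec_count_column; infer_instance

-- ===== CLAIM (what is proved, stated in full; the proofs are below) =====
def Claim_equal_count_column : Prop := ∀ (pipe_tiles : List Int), Dom_count_column pipe_tiles → Pre_count_column pipe_tiles → Spec_count_column pipe_tiles (count_column pipe_tiles)

-- ===== LEMMAS AND PROOFS =====

-- mod 2 as emod
lemma mod2 (p : Int) : PySem.Int.mod p 2 = p % 2 :=
  PySem.Int.mod_eq_emod_of_pos (by norm_num)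

-- a run of points that are not tiles and whose predecessors are not tiles:
-- parity unchanged, count grows by the run length if parity is odd
lemma emptyRun (l : List Int) (n : Nat) : ∀ (x p c : Int),
    (∀ k : Nat, k < n → (x + k) ∉ l ∧ (x + k - 1) ∉ l) →
    (PySem.List.pyRange x (x + n) 1).foldl (stepA l) (p, c)
      = (p, c + if p % 2 = 1 then (n : Int) else 0) := by
  induction n with
  | zero =>
    intro x p c _
    rw [show x + ((0:Nat):Int) = x by push_cast; ring,
      PySem.List.pyRange_one_eq_nil (le_refl x)]
    simp
  | succ m ih =>
    intro x p c h
    have hx0 : x ∉ l := by simpa using (h 0 (by omega)).1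
    have hx1 : x - 1 ∉ l := by simpa using (h 0 (by omega)).2
    rw [PySem.List.pyRange_one_cons (by push_cast; omega), List.foldl_cons]
    have e1 : stepA l (p, c) x = (p, c + if p % 2 = 1 then 1 else 0) := by
      simp only [stepA, mod2]
      rw [if_neg (show ¬(x ∉ l ∧ x - 1 ∈ l) from fun hc => hx1 hc.2)]
      by_cases hp : p % 2 = 1 <;> simp [hp, hx0]
    rw [e1]
    have hshift : ∀ k : Nat, k < m → (x + 1 + (k:Int)) ∉ l ∧ (x + 1 + (k:Int) - 1) ∉ l := by
      intro k hk
      have h1 := h (k + 1) (by omega)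
      have e2 : x + ((k + 1 : Nat) : Int) = x + 1 + (k : Int) := by push_cast; ring
      rw [e2] at h1
      exact h1
    have hih := ih (x + 1) p (c + if p % 2 = 1 then 1 else 0) hshift
    rw [show x + 1 + ((m:Nat):Int) = x + ((m + 1 : Nat) : Int) by push_cast; ring] at hih
    rw [hih]
    by_cases hp : p % 2 = 1 <;> simp [hp] <;> push_cast <;> ring

-- a tile point changes nothing
lemma tileStep (l : List Int) (t p c : Int) (h : t ∈ l) : stepA l (p, c) t = (p, c) := by
  simp [stepA, h]

-- the block (t, t']: flip at the gap start (if any), then the tile t'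
lemma block (l : List Int) (t t' p c : Int) (ht : t ∈ l) (ht' : t' ∈ l) (hlt : t < t')
    (hmid : ∀ i, t < i → i < t' → i ∉ l) :
    (PySem.List.pyRange (t + 1) (t' + 1) 1).foldl (stepA l) (p, c)
      = if 0 < t' - t - 1 then
          (p + 1, c + if (p + 1) % 2 = 1 then t' - t - 1 else 0)
        else (p, c) := by
  by_cases hg : 0 < t' - t - 1
  · rw [PySem.List.pyRange_one_succ_right (by omega : t + 1 ≤ t'),
      PySem.List.pyRange_one_cons (by omega : t + 1 < t')]
    simp only [List.foldl_append, List.foldl_cons, List.foldl_nil]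
    have h1 : stepA l (p, c) (t + 1) = (p + 1, c + if (p + 1) % 2 = 1 then 1 else 0) := by
      have hmem : (t + 1) ∉ l ∧ (t + 1 - 1) ∈ l :=
        ⟨hmid _ (by omega) (by omega), by simpa using ht⟩
      simp only [stepA, mod2]
      rw [if_pos hmem]
      by_cases hp : (p + 1) % 2 = 1 <;> simp [hp, hmem.1]
    rw [h1]
    have hrange : PySem.List.pyRange (t + 1 + 1) t' 1
        = PySem.List.pyRange (t + 2) ((t + 2) + (((t' - t - 2).toNat : Nat) : Int)) 1 := by
      congr 1 <;> omega
    rw [hrange,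
      emptyRun l (t' - t - 2).toNat (t + 2) (p + 1) (c + if (p + 1) % 2 = 1 then 1 else 0)
        (by
          intro k hk
          refine ⟨hmid _ (by omega) (by omega), ?_⟩
          rw [show t + 2 + (k:Int) - 1 = t + 1 + (k:Int) by ring]
          exact hmid _ (by omega) (by omega))]
    rw [tileStep l t' _ _ ht', if_pos hg]
    by_cases hp : (p + 1) % 2 = 1 <;> simp [hp] <;> omega
  · have ht1 : t' = t + 1 := by omega
    subst ht1
    rw [if_neg hg, PySem.List.pyRange_one_singleton, List.foldl_cons, List.foldl_nil,
      tileStep l (t + 1) p c ht']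

lemma getLastD_ge (ts : List Int) : ∀ t : Int, List.Pairwise (· < ·) (t :: ts) →
    t ≤ ts.getLastD t := by
  induction ts with
  | nil => intro t _; rw [List.getLastD_nil]
  | cons a tl ih =>
    intro t hpw
    rw [List.getLastD_cons]
    rcases List.pairwise_cons.mp hpw with ⟨h1, h2⟩
    have := ih a h2
    have := h1 a (by simp)
    omega

lemma getLastD_mem (ts : List Int) : ∀ t : Int, ts.getLastD t ∈ t :: ts := by
  induction ts with
  | nil => intro t; rw [List.getLastD_nil]; simp
  | cons a tl ih =>
    intro t
    rw [List.getLastD_cons]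
    exact List.mem_cons_of_mem t (ih a)

lemma mem_le_getLastD (ts : List Int) : ∀ t u : Int, List.Pairwise (· < ·) (t :: ts) →
    u ∈ t :: ts → u ≤ ts.getLastD t := by
  induction ts with
  | nil =>
    intro t u _ hu
    rw [List.getLastD_nil]
    rcases List.mem_cons.mp hu with rfl | h
    · exact le_refl u
    · simp at h
  | cons a tl ih =>
    intro t u hpw hu
    rw [List.getLastD_cons]
    rcases List.pairwise_cons.mp hpw with ⟨h1, h2⟩
    rcases List.mem_cons.mp hu with rfl | hu'
    · have := getLastD_ge tl a h2
      have := h1 a (by simp)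
      omega
    · exact ih a u h2 hu'

-- the main correspondence: A's scan from just after tile t up to the last tile
-- equals B's gap fold, with B's bool tracking A's counter parity
lemma chainLemma (l : List Int) : ∀ (ts : List Int) (t p c : Int) (ins : Bool),
    t ∈ l → (∀ u ∈ ts, u ∈ l) → List.Pairwise (· < ·) (t :: ts) →
    (∀ i, t ≤ i → i ≤ ts.getLastD t → i ∈ l → i ∈ t :: ts) →
    (ins = decide (p % 2 = 1)) →
    ∃ p', (PySem.List.pyRange (t + 1) (ts.getLastD t + 1) 1).foldl (stepA l) (p, c)
            = (p', (((t :: ts).zip ts).foldl stepB (c, ins)).1)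
        ∧ (((t :: ts).zip ts).foldl stepB (c, ins)).2 = decide (p' % 2 = 1) := by
  intro ts
  induction ts with
  | nil =>
    intro t p c ins _ _ _ _ hins
    refine ⟨p, ?_, by simpa using hins⟩
    rw [List.getLastD_nil, PySem.List.pyRange_one_eq_nil (le_refl (t + 1))]
    simp
  | cons t' rest ih =>
    intro t p c ins htl hall hpw hcomp hins
    rcases List.pairwise_cons.mp hpw with ⟨h1, hpw'⟩
    have htt' : t < t' := h1 t' (by simp)
    have ht'l : t' ∈ l := hall t' (by simp)
    have ht'last : t' ≤ rest.getLastD t' := getLastD_ge rest t' hpw'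
    rw [List.getLastD_cons,
      PySem.List.pyRange_one_append (t + 1) (t' + 1) (rest.getLastD t' + 1)
        (by omega) (by omega),
      List.foldl_append]
    have hmid : ∀ i, t < i → i < t' → i ∉ l := by
      intro i hi1 hi2 hil
      have hm : i ∈ t :: t' :: rest :=
        hcomp i (by omega) (by rw [List.getLastD_cons]; omega) hil
      rcases List.mem_cons.mp hm with rfl | hm'
      · omega
      rcases List.mem_cons.mp hm' with rfl | hm''
      · omega
      rcases List.pairwise_cons.mp hpw' with ⟨h2, _⟩
      have := h2 i hm''
      omega
    rw [block l t t' p c htl ht'l htt' hmid]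
    have hnorm : ∀ d e : Int, (0:Int) < e → (d + if (p + 1) % 2 = 1 then e else 0)
        = (if (p + 1) % 2 = 1 then d + e else d) := by
      intro d e _; split_ifs <;> ring
    have hzip : ((t :: t' :: rest).zip (t' :: rest)) = (t, t') :: ((t' :: rest).zip rest) := rfl
    rw [hzip, List.foldl_cons]
    have hcomp' : ∀ i, t' ≤ i → i ≤ rest.getLastD t' → i ∈ l → i ∈ t' :: rest := by
      intro i hi1 hi2 hil
      have hm : i ∈ t :: t' :: rest :=
        hcomp i (by omega) (by rw [List.getLastD_cons]; omega) hil
      rcases List.mem_cons.mp hm with rfl | hm'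
      · omega
      · exact hm'
    by_cases hg : 0 < t' - t - 1
    · rw [if_pos hg, hnorm c (t' - t - 1) hg]
      have hstep : stepB (c, ins) (t, t')
          = ((if (p + 1) % 2 = 1 then c + (t' - t - 1) else c), !ins) := by
        simp only [stepB]
        rw [if_pos (show (0:Int) < ((t, t') : Int × Int).2 - ((t, t') : Int × Int).1 - 1 from hg)]
        subst hins
        by_cases hp : p % 2 = 1
        · rw [if_neg (by omega : ¬ (p + 1) % 2 = 1)]
          simp [hp]
        · rw [if_pos (by omega : (p + 1) % 2 = 1)]
          simp [hp]
      rw [hstep]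
      have hins' : (!ins) = decide ((p + 1) % 2 = 1) := by
        subst hins
        by_cases hp : p % 2 = 1 <;> simp [hp] <;> omega
      exact ih t' (p + 1) (if (p + 1) % 2 = 1 then c + (t' - t - 1) else c) (!ins)
        ht'l (fun u hu => hall u (by simp [hu])) hpw' hcomp' hins'
    · rw [if_neg hg]
      have hstep : stepB (c, ins) (t, t') = (c, ins) := by
        simp only [stepB]
        rw [if_neg (show ¬ (0:Int) < ((t, t') : Int × Int).2 - ((t, t') : Int × Int).1 - 1 from hg)]
      rw [hstep]
      exact ih t' p c ins ht'l (fun u hu => hall u (by simp [hu])) hpw' hcomp' hins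

-- ===== VERDICT (by name: the statement is the Claim_ definition above) =====
theorem count_column_spec : Claim_equal_count_column := by
  unfold Claim_equal_count_column
  intro l _ hne
  unfold Spec_count_column count_column count_column_alt
  obtain ⟨x, xs, rfl⟩ := List.exists_cons_of_ne_nil hne
  set l := x :: xs with hl
  have h0 : PySem.List.pyGet? l 0 = some x := PySem.List.pyGet?_zero_cons x xs
  have hLast : PySem.List.pyGet? l (-1) = some (l.getLast (by simp [hl])) := by
    rw [PySem.List.pyGet?_neg_one, List.getLast?_eq_getLast]
  set hi := l.getLast (by simp [hl]) with hhi
  rw [h0, hLast]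
  set ts := PySem.List.sorted
    (PySem.Set.ofList (l.filter (fun t => decide (x - 1 ≤ t ∧ t ≤ hi))))
    (fun y => y) false with hts
  show (List.foldl (stepA l) (0, 0) (PySem.List.pyRange x (hi + 1) 1)).2
      = (if hi < x then 0 else ((ts.zip ts.tail).foldl stepB (0, false)).1)
  by_cases hcase : hi < x
  · rw [if_pos hcase, PySem.List.pyRange_one_eq_nil (by omega : hi + 1 ≤ x)]
    simp
  · rw [if_neg hcase]
    rw [not_lt] at hcase
    have hmemts : ∀ u : Int, u ∈ ts ↔ u ∈ l ∧ x - 1 ≤ u ∧ u ≤ hi := by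
      intro u
      rw [hts, PySem.List.mem_sorted, PySem.Set.mem_ofList, List.mem_filter]
      simp
    have hpw : ts.Pairwise (· < ·) := PySem.List.sorted_ofList_pairwise_lt _
    have hxts : x ∈ ts := (hmemts x).mpr ⟨by simp [hl], by omega, hcase⟩
    have hhits : hi ∈ ts := (hmemts hi).mpr ⟨List.getLast_mem _, by omega, le_refl hi⟩
    cases hts2 : ts with
    | nil => rw [hts2] at hxts; simp at hxts
    | cons t0 tail =>
      rw [hts2] at hmemts hpw hxts hhits
      have ht0x : t0 ≤ x := by
        rcases List.mem_cons.mp hxts with rfl | hx'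
        · exact le_refl x
        · rcases List.pairwise_cons.mp hpw with ⟨h1, _⟩
          have := h1 x hx'
          omega
      have ht0lb : x - 1 ≤ t0 := ((hmemts t0).mp (by simp)).2.1
      have hlasteq : tail.getLastD t0 = hi := by
        have hle : hi ≤ tail.getLastD t0 := mem_le_getLastD tail t0 hi hpw hhits
        have hm2 : tail.getLastD t0 ∈ t0 :: tail := getLastD_mem tail t0
        have := ((hmemts _).mp hm2).2.2
        omega
      have hcomp : ∀ i, t0 ≤ i → i ≤ tail.getLastD t0 → i ∈ l → i ∈ t0 :: tail := by
        intro i h1 h2 hil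
        exact (hmemts i).mpr ⟨hil, by omega, by omega⟩
      obtain ⟨p', hA, _⟩ := chainLemma l tail t0 0 0 false
        ((hmemts t0).mp (by simp)).1 (fun u hu => ((hmemts u).mp (by simp [hu])).1)
        hpw hcomp (by simp)
      rw [hlasteq] at hA
      have hBside : ((t0 :: tail).zip (t0 :: tail).tail) = ((t0 :: tail).zip tail) := rfl
      rw [hBside]
      rcases (by omega : t0 = x - 1 ∨ t0 = x) with h | h
      · rw [show x = t0 + 1 by omega, hA]
      · rw [show PySem.List.pyRange x (hi + 1) 1 = x :: PySem.List.pyRange (x + 1) (hi + 1) 1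
            from PySem.List.pyRange_one_cons (by omega), List.foldl_cons,
          tileStep l x 0 0 (by simp [hl])]
        rw [show x + 1 = t0 + 1 by omega, hA]
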